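-- pv_equiv track=rewrite | github.com/2811907609/lixiang_code_clone | codebuddy/ai_agents/tests/supervisor_agents/haloos_unit_test/get_token_use_from_log.py | find_consecutive_sequences_in_order
-- ===== SOURCE A (Python) =====
-- def find_consecutive_sequences_in_order(data):
--     """
--     按照现有顺序找出step中的连续序列（不重新排序）
--     """
--     if not data:
--         return []
--
--     sequences = []
--     current_sequence = [data[0]]
--
--     for i in range(1, len(data)):
--         current_step = data[i]['step']
--         prev_step = data[i-1]['step']
--
--         # 如果当前step比前一个step大1，则是连续的
--         if current_step == prev_step + 1:
--             current_sequence.append(data[i])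
--         else:
--             # 连续序列结束，保存当前序列
--             if len(current_sequence) > 1:  # 只保存长度大于1的序列
--                 sequences.append(current_sequence)
--             current_sequence = [data[i]]
--
--     # 添加最后一个序列
--     if len(current_sequence) > 1:
--         sequences.append(current_sequence)
--     return sequences
-- ===== SOURCE B (Python) =====
-- def find_consecutive_sequences_in_order(data):
--     # Two-pass boundary approach: collect the indices where consecutiveness
--     # breaks, then slice data between boundaries, keeping runs longer than 1.
--     n = len(data)
--     bounds = [0] + [i for i in range(1, n) if data[i]['step'] != data[i - 1]['step'] + 1] + [n]
--     return [data[a:b] for a, b in zip(bounds, bounds[1:]) if b - a > 1]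
-- ===== Notes on version B (the rewrite author's own statement) =====
-- stated objective: alternative
-- what changed: Replaces the single-pass accumulator (growing current_sequence, flushing on break) by a boundary-index computation: first collect all break indices, then slice data between consecutive boundaries and keep slices longer than 1.
import Mathlib
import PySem

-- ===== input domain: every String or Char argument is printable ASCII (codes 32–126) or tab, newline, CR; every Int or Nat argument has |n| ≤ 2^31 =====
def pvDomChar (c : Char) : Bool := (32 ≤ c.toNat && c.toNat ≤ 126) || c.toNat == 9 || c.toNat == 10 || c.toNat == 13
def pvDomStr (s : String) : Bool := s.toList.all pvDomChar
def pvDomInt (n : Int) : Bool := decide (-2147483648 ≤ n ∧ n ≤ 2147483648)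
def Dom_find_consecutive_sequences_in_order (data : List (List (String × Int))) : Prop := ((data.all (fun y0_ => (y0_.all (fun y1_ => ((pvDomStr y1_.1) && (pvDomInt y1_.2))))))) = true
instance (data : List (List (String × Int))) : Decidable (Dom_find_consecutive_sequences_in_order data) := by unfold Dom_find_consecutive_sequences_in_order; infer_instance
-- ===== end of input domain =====

-- B replaces A's single-pass accumulator by a two-pass boundary computation
-- (collect break indices, then slice between consecutive boundaries); same cost,
-- alternative structure.

-- ===== PORT A =====
-- shared helper: d['step'] as first-match association-list lookup (exact under Pre_,
-- which guarantees the key is present; the default 0 is never reached there)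
def pvStep (d : List (String × Int)) : Int := PySem.Dict.getD (PySem.Dict.mk d) "step" 0

def find_consecutive_sequences_in_order (data : List (List (String × Int))) : List (List (List (String × Int))) :=
  match data with
  | [] => []
  | d0 :: _ =>
    let res := (PySem.List.pyRange 1 (data.length : Int)).foldl
      (fun (st : List (List (List (String × Int))) × List (List (String × Int))) i =>
        let current_step := pvStep (PySem.List.pyGetD data i [])
        let prev_step := pvStep (PySem.List.pyGetD data (i - 1) [])
        if current_step = prev_step + 1 then
          (st.1, st.2 ++ [PySem.List.pyGetD data i []])
        else
          ((if st.2.length > 1 then st.1 ++ [st.2] else st.1), [PySem.List.pyGetD data i []]))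
      ([], [d0])
    if res.2.length > 1 then res.1 ++ [res.2] else res.1

-- ===== PORT B =====
def find_consecutive_sequences_in_order_alt (data : List (List (String × Int))) : List (List (List (String × Int))) :=
  let n : Int := data.length
  let bounds : List Int :=
    [0] ++ (PySem.List.pyRange 1 n).filter
      (fun i => !(pvStep (PySem.List.pyGetD data i []) == pvStep (PySem.List.pyGetD data (i - 1) []) + 1)) ++ [n]
  (bounds.zip (PySem.List.slice bounds (some 1) none)).filterMap
    (fun p => if p.2 - p.1 > 1 then some (PySem.List.slice data (some p.1) (some p.2)) else none)

-- ===== PRECONDITION & SPEC =====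
-- Pre_: if data has at least two elements, every element dict carries the key "step"
-- (Python A subscripts d['step'] exactly then, and raises KeyError on a missing key;
-- on shorter inputs no lookup happens and A returns normally).
def Pre_find_consecutive_sequences_in_order (data : List (List (String × Int))) : Prop :=
  data.length ≤ 1 ∨ (data.all (fun d => d.any (fun p => p.1 == "step"))) = true
instance (data : List (List (String × Int))) : Decidable (Pre_find_consecutive_sequences_in_order data) := by unfold Pre_find_consecutive_sequences_in_order; infer_instance
def pvWitness_find_consecutive_sequences_in_order : (List (List (String × Int))) :=
  [[("step", 1)], [("step", 2)], [("step", 5)]]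
def Spec_find_consecutive_sequences_in_order (data : List (List (String × Int))) (out : List (List (List (String × Int)))) : Prop := out = find_consecutive_sequences_in_order_alt data
instance (data : List (List (String × Int))) (out : List (List (List (String × Int)))) : Decidable (Spec_find_consecutive_sequences_in_order data out) := by unfold Spec_find_consecutive_sequences_in_order; infer_instance

-- ===== CLAIM (what is proved, stated in full; the proofs are below) =====
def Claim_equal_find_consecutive_sequences_in_order : Prop := ∀ (data : List (List (String × Int))), Dom_find_consecutive_sequences_in_order data → Pre_find_consecutive_sequences_in_order data → Spec_find_consecutive_sequences_in_order data (find_consecutive_sequences_in_order data)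

-- ===== LEMMAS AND PROOFS =====

-- proof-side Nat-indexed vocabulary
def pvStepAt (data : List (List (String × Int))) (i : Nat) : Int := pvStep (data.getD i [])
def pvBrk (data : List (List (String × Int))) (i : Nat) : Bool :=
  !(pvStepAt data i == pvStepAt data (i - 1) + 1)
def pvBrks (data : List (List (String × Int))) (m : Nat) : List Nat :=
  (List.range' 1 m).filter (pvBrk data)
def pvAdj : List Nat → List (Nat × Nat)
  | a :: b :: t => (a, b) :: pvAdj (b :: t)
  | _ => []
def pvLast (l : List Nat) : Nat := l.foldl (fun _ x => x) 0
def pvSeg (data : List (List (String × Int))) (p : Nat × Nat) : Option (List (List (String × Int))) :=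
  if p.2 - p.1 > 1 then some ((data.drop p.1).take (p.2 - p.1)) else none
def pvStepFn (data : List (List (String × Int)))
    (st : List (List (List (String × Int))) × List (List (String × Int))) (i : Nat) :
    List (List (List (String × Int))) × List (List (String × Int)) :=
  if pvStepAt data i = pvStepAt data (i - 1) + 1 then (st.1, st.2 ++ [data.getD i []])
  else ((if st.2.length > 1 then st.1 ++ [st.2] else st.1), [data.getD i []])

lemma pvRange_bridge (n : Nat) :
    PySem.List.pyRange 1 (n : Int) = List.map (fun (j : Nat) => (j : Int)) (List.range' 1 (n - 1)) := by
  refine List.ext_getElem ?_ ?_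
  · simp [PySem.List.length_pyRange_one]
    try omega
  · intro k h1 h2
    simp [PySem.List.getElem_pyRange_one, List.getElem_range']
    try push_cast
    try ring

lemma pvAdj_concat (l : List Nat) (a x : Nat) :
    pvAdj (a :: l ++ [x]) = pvAdj (a :: l) ++ [(l.foldl (fun _ y => y) a, x)] := by
  induction l generalizing a with
  | nil => simp [pvAdj]
  | cons b t ih =>
    simp only [List.cons_append, pvAdj, List.foldl_cons]
    exact congrArg (List.cons (a, b)) (ih b)

lemma pvAdj_concat0 (l : List Nat) (x : Nat) :
    pvAdj (0 :: (l ++ [x])) = pvAdj (0 :: l) ++ [(pvLast l, x)] := by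
  rw [← List.cons_append]
  exact pvAdj_concat l 0 x

lemma pvZip_tail_eq_adj (l : List Nat) : (l.zip l.tail) = pvAdj l := by
  induction l with
  | nil => rfl
  | cons a l ih =>
    cases l with
    | nil => rfl
    | cons b t =>
      simp only [List.tail_cons] at ih ⊢
      simp [pvAdj, List.zip_cons_cons, ← ih]

lemma pvFoldl_last_mem (l : List Nat) : ∀ a : Nat, l.foldl (fun _ y => y) a ∈ a :: l := by
  induction l with
  | nil => intro a; simp
  | cons b t ih =>
    intro a
    have := ih b
    simp only [List.foldl_cons]
    rcases List.mem_cons.1 this with h | h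
    · simp [h]
    · simp [List.mem_cons, Or.inr (Or.inr h)]

lemma pvBrks_le (data : List (List (String × Int))) (m : Nat) : ∀ x ∈ pvBrks data m, 1 ≤ x ∧ x ≤ m := by
  intro x hx
  rw [pvBrks, List.mem_filter, List.mem_range'_1] at hx
  omega

lemma pvLast_le (data : List (List (String × Int))) (m : Nat) : pvLast (pvBrks data m) ≤ m := by
  have h := pvFoldl_last_mem (pvBrks data m) 0
  rcases List.mem_cons.1 h with h0 | h1
  · unfold pvLast
    omega
  · exact (pvBrks_le data m _ h1).2

lemma pvLast_concat (l : List Nat) (x : Nat) : pvLast (l ++ [x]) = x := by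
  simp [pvLast, List.foldl_append]

lemma pvBrks_succ (data : List (List (String × Int))) (m : Nat) :
    pvBrks data (m + 1) = pvBrks data m ++ (if pvBrk data (m + 1) then [m + 1] else []) := by
  unfold pvBrks
  rw [List.range'_concat]
  simp only [Nat.one_mul, List.filter_append, List.filter_singleton]
  rw [Nat.add_comm 1 m, Bool.cond_eq_ite]

lemma pvTake_one_drop (data : List (List (String × Int))) (k : Nat) (hk : k < data.length) :
    (data.drop k).take 1 = [data.getD k []] := by
  rw [List.take_one, List.head?_drop, List.getElem?_eq_getElem hk, List.getD_eq_getElem data [] hk]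
  rfl

lemma pvAdj_rel {R : Nat → Nat → Prop} : ∀ (l : List Nat), l.Pairwise R → ∀ p ∈ pvAdj l, R p.1 p.2 := by
  intro l
  induction l with
  | nil => simp [pvAdj]
  | cons a l ih =>
    cases l with
    | nil => simp [pvAdj]
    | cons b t =>
      intro hpw p hp
      simp only [pvAdj, List.mem_cons] at hp
      rcases hp with hp | hp
      · subst hp
        exact (List.pairwise_cons.mp hpw).1 b (List.mem_cons_self)
      · exact ih (List.pairwise_cons.mp hpw).2 p hp

lemma pvBounds_pairwise (data : List (List (String × Int))) :
    (((0 : Nat) :: pvBrks data (data.length - 1)) ++ [data.length]).Pairwise (· ≤ ·) := by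
  rw [List.pairwise_append]
  refine ⟨?_, by simp, ?_⟩
  · rw [List.pairwise_cons]
    refine ⟨fun x _ => Nat.zero_le x, ?_⟩
    unfold pvBrks
    exact ((List.pairwise_lt_range' 1).filter _).imp Nat.le_of_lt
  · intro x hx y hy
    simp only [List.mem_singleton] at hy
    subst hy
    rcases List.mem_cons.1 hx with h0 | h1
    · omega
    · have := pvBrks_le data (data.length - 1) x h1
      omega

lemma pvInv (data : List (List (String × Int))) (d0 : List (String × Int))
    (t : List (List (String × Int))) (h : data = d0 :: t) (m : Nat) (hm : m < data.length) :
    (List.range' 1 m).foldl (pvStepFn data) ([], [d0]) =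
      ((pvAdj (0 :: pvBrks data m)).filterMap (pvSeg data),
       (data.drop (pvLast (pvBrks data m))).take (m + 1 - pvLast (pvBrks data m))) := by
  subst h
  induction m with
  | zero =>
    simp [pvBrks, pvAdj, pvLast]
  | succ m ih =>
    have hm' : m < (d0 :: t).length := Nat.lt_of_succ_lt hm
    have hL : pvLast (pvBrks (d0 :: t) m) ≤ m := pvLast_le (d0 :: t) m
    rw [List.range'_concat, List.foldl_append, ih hm']
    simp only [List.foldl_cons, List.foldl_nil]
    rw [show 1 + 1 * m = m + 1 by omega]
    rw [pvBrks_succ]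
    by_cases hbrk : pvStepAt (d0 :: t) (m + 1) = pvStepAt (d0 :: t) m + 1
    · -- consecutive at m+1: no new break
      have hb : pvBrk (d0 :: t) (m + 1) = false := by
        simp [pvBrk, hbrk]
      simp only [pvStepFn, Nat.add_sub_cancel, if_pos hbrk, hb, Bool.false_eq_true, if_false,
        List.append_nil, Prod.mk.injEq]
      refine ⟨by trivial, ?_⟩
      rw [show m + 1 + 1 - pvLast (pvBrks (d0 :: t) m) = (m + 1 - pvLast (pvBrks (d0 :: t) m)) + 1 by omega,
        List.take_add_one, List.getElem?_drop,
        show pvLast (pvBrks (d0 :: t) m) + (m + 1 - pvLast (pvBrks (d0 :: t) m)) = m + 1 by omega,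
        List.getElem?_eq_getElem hm, List.getD_eq_getElem (d0 :: t) [] hm]
      rfl
    · -- break at m+1
      have hb : pvBrk (d0 :: t) (m + 1) = true := by
        simp [pvBrk, hbrk]
      have hlen : (((d0 :: t).drop (pvLast (pvBrks (d0 :: t) m))).take
          (m + 1 - pvLast (pvBrks (d0 :: t) m))).length = m + 1 - pvLast (pvBrks (d0 :: t) m) := by
        simp only [List.length_take, List.length_drop]
        omega
      simp only [pvStepFn, Nat.add_sub_cancel, if_neg hbrk, hb, if_true, Prod.mk.injEq]
      rw [pvAdj_concat0, List.filterMap_append, pvLast_concat]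
      constructor
      · by_cases hgt : 1 < m + 1 - pvLast (pvBrks (d0 :: t) m)
        · rw [if_pos (by rw [hlen]; exact hgt)]
          simp [pvSeg, hgt]
        · rw [if_neg (by rw [hlen]; exact hgt)]
          simp [pvSeg, hgt]
      · rw [show m + 1 + 1 - (m + 1) = 1 by omega, pvTake_one_drop (d0 :: t) (m + 1) hm]

lemma pvA_eq (data : List (List (String × Int))) :
    find_consecutive_sequences_in_order data =
      (pvAdj ((0 :: pvBrks data (data.length - 1)) ++ [data.length])).filterMap (pvSeg data) := by
  cases data with
  | nil => rfl
  | cons d0 t =>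
    simp only [find_consecutive_sequences_in_order, List.length_cons, Nat.add_sub_cancel,
      List.cons_append]
    rw [pvRange_bridge (t.length + 1), Nat.add_sub_cancel, List.foldl_map,
      PySem.List.foldl_congr_mem _ _ (pvStepFn (d0 :: t)) _ (by
        intro acc j hj
        have h1 : 1 ≤ j := (List.mem_range'_1.mp hj).1
        have hc : ((j : Int) - 1) = ((j - 1 : Nat) : Int) := by omega
        simp only [hc, PySem.List.pyGetD_natCast, pvStepFn, pvStepAt]
        rfl),
      pvInv (d0 :: t) d0 t rfl t.length (by simp)]
    have hL : pvLast (pvBrks (d0 :: t) t.length) ≤ t.length := pvLast_le (d0 :: t) t.length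
    have hlen : (((d0 :: t).drop (pvLast (pvBrks (d0 :: t) t.length))).take
        (t.length + 1 - pvLast (pvBrks (d0 :: t) t.length))).length
        = t.length + 1 - pvLast (pvBrks (d0 :: t) t.length) := by
      simp only [List.length_take, List.length_drop, List.length_cons]
      omega
    rw [pvAdj_concat0, List.filterMap_append]
    by_cases hgt : 1 < t.length + 1 - pvLast (pvBrks (d0 :: t) t.length)
    · rw [if_pos (by rw [hlen]; exact hgt)]
      simp [pvSeg, hgt]
    · rw [if_neg (by rw [hlen]; exact hgt)]
      simp [pvSeg, hgt]

lemma pvB_eq (data : List (List (String × Int))) :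
    find_consecutive_sequences_in_order_alt data =
      (pvAdj ((0 :: pvBrks data (data.length - 1)) ++ [data.length])).filterMap (pvSeg data) := by
  simp only [find_consecutive_sequences_in_order_alt]
  rw [show ((data.length : Nat) : Int) = ((data.length : Nat) : Int) from rfl, pvRange_bridge data.length]
  have hfilter : (List.map (fun (j : Nat) => (j : Int)) (List.range' 1 (data.length - 1))).filter
      (fun i => !(pvStep (PySem.List.pyGetD data i []) == pvStep (PySem.List.pyGetD data (i - 1) []) + 1))
      = List.map (fun (j : Nat) => (j : Int)) (pvBrks data (data.length - 1)) := by
    rw [List.filter_map]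
    refine congrArg _ (List.filter_congr ?_)
    intro j hj
    have h1 : 1 ≤ j := (List.mem_range'_1.mp hj).1
    have hc : ((j : Int) - 1) = ((j - 1 : Nat) : Int) := by omega
    simp only [Function.comp, hc, PySem.List.pyGetD_natCast, pvBrk, pvStepAt]
  rw [hfilter]
  have hbounds : [(0 : Int)] ++ List.map (fun (j : Nat) => (j : Int)) (pvBrks data (data.length - 1))
      ++ [(data.length : Int)]
      = List.map (fun (j : Nat) => (j : Int)) (((0 : Nat) :: pvBrks data (data.length - 1)) ++ [data.length]) := by
    simp
  rw [hbounds, PySem.List.slice_from_one, ← List.map_tail, List.zip_map, List.filterMap_map,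
    pvZip_tail_eq_adj]
  refine List.filterMap_congr ?_
  intro p hp
  have hle : p.1 ≤ p.2 := pvAdj_rel _ (pvBounds_pairwise data) p hp
  rcases p with ⟨a, b⟩
  simp only [Function.comp, Prod.map, PySem.List.slice_natCast, pvSeg]
  by_cases hgt : 1 < b - a
  · rw [if_pos (by omega), if_pos hgt]
  · rw [if_neg (by omega), if_neg hgt]

-- ===== VERDICT (by name: the statement is the Claim_ definition above) =====
theorem find_consecutive_sequences_in_order_spec : Claim_equal_find_consecutive_sequences_in_order := by
  intro data _ _
  unfold Spec_find_consecutive_sequences_in_order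
  rw [pvA_eq, pvB_eq]
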